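-- pv_equiv track=rewrite | github.com/heakwang0622-netizen/instagram-clone | backend/app/utils/media_upload.py | _effective_content_type
-- ===== SOURCE A (Python) =====
-- ALLOWED_IMAGE = {"image/jpeg", "image/png", "image/webp"}
--
-- ALLOWED_VIDEO = {"video/mp4", "video/webm"}
--
-- def _effective_content_type(filename: str | None, content_type: str | None) -> str:
--     """브라우저/OS에 따라 MIME이 비어 있거나 octet-stream인 경우 파일명으로 보정합니다."""
--     ct = (content_type or "").strip()
--     low = ct.lower()
--     if low.startswith("image/") or low.startswith("video/"):
--         return ct
--     if low in ALLOWED_IMAGE | ALLOWED_VIDEO: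
--         return ct
--     if low not in ("", "application/octet-stream"):
--         return ct
--     name = (filename or "").lower()
--     suffix_map: list[tuple[str, str]] = [
--         (".jpg", "image/jpeg"),
--         (".jpeg", "image/jpeg"),
--         (".jpe", "image/jpeg"),
--         (".jfif", "image/jpeg"),
--         (".png", "image/png"),
--         (".webp", "image/webp"),
--         (".gif", "image/gif"),
--         (".mp4", "video/mp4"),
--         (".webm", "video/webm"),
--         (".mov", "video/quicktime"),
--     ]
--     for suf, mime in suffix_map:
--         if name.endswith(suf):
--             return mime
--     return ct
-- ===== SOURCE B (Python) =====
-- ALLOWED_IMAGE = {"image/jpeg", "image/png", "image/webp"}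
--
-- ALLOWED_VIDEO = {"video/mp4", "video/webm"}
--
-- _EXT_MIME = {
--     ".jpg": "image/jpeg",
--     ".jpeg": "image/jpeg",
--     ".jpe": "image/jpeg",
--     ".jfif": "image/jpeg",
--     ".png": "image/png",
--     ".webp": "image/webp",
--     ".gif": "image/gif",
--     ".mp4": "video/mp4",
--     ".webm": "video/webm",
--     ".mov": "video/quicktime",
-- }
--
--
-- def _effective_content_type(filename, content_type):
--     ct = (content_type or "").strip()
--     low = ct.lower()
--     if low not in ("", "application/octet-stream"):
--         return ct
--     name = (filename or "").lower()
--     _, dot, ext = name.rpartition(".")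
--     return _EXT_MIME.get(dot + ext, ct) if dot else ct
-- ===== Notes on version B (the rewrite author's own statement) =====
-- stated objective: idiomatic
-- what changed: B replaces A's ordered scan over ten endswith tests by extracting the extension once with rpartition('.') and a single dict lookup, and collapses A's three content-type guards into the one 'not in ("", "application/octet-stream")' test that subsumes them.
import Mathlib
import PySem

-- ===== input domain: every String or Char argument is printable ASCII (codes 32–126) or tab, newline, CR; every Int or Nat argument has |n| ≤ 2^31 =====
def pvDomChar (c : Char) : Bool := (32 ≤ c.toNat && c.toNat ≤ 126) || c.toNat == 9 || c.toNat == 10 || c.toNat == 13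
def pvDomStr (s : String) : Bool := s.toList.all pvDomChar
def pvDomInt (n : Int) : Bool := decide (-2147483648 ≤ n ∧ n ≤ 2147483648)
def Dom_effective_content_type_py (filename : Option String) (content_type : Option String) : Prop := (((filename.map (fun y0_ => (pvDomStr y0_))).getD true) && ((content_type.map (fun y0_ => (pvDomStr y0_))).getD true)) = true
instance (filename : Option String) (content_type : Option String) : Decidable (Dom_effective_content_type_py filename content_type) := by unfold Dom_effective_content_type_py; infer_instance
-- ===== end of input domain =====

-- B replaces A's ordered endswith-scan over ten suffixes by extracting the extension once
-- (rpartition on the last '.') and a single dict lookup, and collapses A's three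
-- content-type guards into the one that subsumes them (objective: simpler/more idiomatic).

-- ===== PORT A =====
def pySuffixMap : List (String × String) :=
  [(".jpg", "image/jpeg"), (".jpeg", "image/jpeg"), (".jpe", "image/jpeg"),
   (".jfif", "image/jpeg"), (".png", "image/png"), (".webp", "image/webp"),
   (".gif", "image/gif"), (".mp4", "video/mp4"), (".webm", "video/webm"),
   (".mov", "video/quicktime")]

-- the 'for suf, mime in suffix_map' loop with its early return
def ectScan (name : String) (ct : String) : List (String × String) → String
  | [] => ct
  | (suf, mime) :: rest => if PySem.Str.endswith name suf then mime else ectScan name ct rest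

def effective_content_type_py (filename : Option String) (content_type : Option String) : String :=
  let ct := PySem.Str.strip (content_type.getD "")
  let low := PySem.Str.lower ct
  if PySem.Str.startswith low "image/" || PySem.Str.startswith low "video/" then ct
  else if PySem.Set.contains
      (PySem.Set.union (PySem.Set.ofList ["image/jpeg", "image/png", "image/webp"])
        (PySem.Set.ofList ["video/mp4", "video/webm"])) low then ct
  else if !(low == "" || low == "application/octet-stream") then ct
  else ectScan (PySem.Str.lower (filename.getD "")) ct pySuffixMap

-- ===== PORT B =====
def extMime : PySem.Dict String String :=
  PySem.Dict.ofList
    [(".jpg", "image/jpeg"), (".jpeg", "image/jpeg"), (".jpe", "image/jpeg"),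
     (".jfif", "image/jpeg"), (".png", "image/png"), (".webp", "image/webp"),
     (".gif", "image/gif"), (".mp4", "video/mp4"), (".webm", "video/webm"),
     (".mov", "video/quicktime")]

def effective_content_type_py_alt (filename : Option String) (content_type : Option String) : String :=
  let ct := PySem.Str.strip (content_type.getD "")
  let low := PySem.Str.lower ct
  if !(low == "" || low == "application/octet-stream") then ct
  else
    let name := PySem.Str.lower (filename.getD "")
    -- name.rpartition('.') ported by hand (exact): 'ext' is everything after the LAST '.'
    -- (read off the reversed char list), and 'dot' is non-empty iff '.' occurs in name
    let extRev := name.toList.reverse.takeWhile (· != '.')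
    if name.toList.contains '.' then
      PySem.Dict.getD extMime (String.ofList ('.' :: extRev.reverse)) ct
    else ct

-- ===== PRECONDITION & SPEC =====
def Spec_effective_content_type_py (filename : Option String) (content_type : Option String) (out : String) : Prop := out = effective_content_type_py_alt filename content_type
instance (filename : Option String) (content_type : Option String) (out : String) : Decidable (Spec_effective_content_type_py filename content_type out) := by unfold Spec_effective_content_type_py; infer_instance

-- ===== CLAIM (what is proved, stated in full; the proofs are below) =====
def Claim_equal_effective_content_type_py : Prop := ∀ (filename : Option String) (content_type : Option String), Dom_effective_content_type_py filename content_type → Spec_effective_content_type_py filename content_type (effective_content_type_py filename content_type)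

-- ===== LEMMAS AND PROOFS =====

theorem tw_app (l t : List Char) (h : '.' ∉ l) : List.takeWhile (· != '.') (l ++ '.' :: t) = l := by
  induction l with
  | nil => simp
  | cons a as ih =>
    have ha : a ≠ '.' := fun he => h (by simp [he])
    have has : '.' ∉ as := fun hm => h (List.mem_cons_of_mem _ hm)
    simp [ha, ih has]

theorem rev_decomp (r : List Char) (h : '.' ∈ r) :
    r = r.takeWhile (· != '.') ++ '.' :: (r.dropWhile (· != '.')).tail := by
  induction r with
  | nil => simp at h
  | cons a as ih =>
    by_cases ha : a = '.'
    · subst ha; simp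
    · have hm : '.' ∈ as := by
        rcases List.mem_cons.mp h with h1 | h1
        · exact absurd h1.symm ha
        · exact h1
      have hb : (a != '.') = true := by simpa using ha
      simp only [List.takeWhile_cons, List.dropWhile_cons, hb, if_true, List.cons_append]
      exact congrArg (a :: ·) (ih hm)

-- a suffix '.'+tail (tail dot-free) matches iff tail is exactly the extension after the last '.'
theorem key_iff (cs tail : List Char) (ht : '.' ∉ tail) (h : '.' ∈ cs) :
    (('.' :: tail) <:+ cs) ↔ tail.reverse = cs.reverse.takeWhile (· != '.') := by
  rw [← List.reverse_prefix]
  constructor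
  · rintro ⟨t, htt⟩
    have hr : cs.reverse = tail.reverse ++ '.' :: t := by
      rw [← htt]; simp
    rw [hr, tw_app _ _ (by simpa using ht)]
  · intro he
    refine ⟨(cs.reverse.dropWhile (· != '.')).tail, ?_⟩
    conv_rhs => rw [rev_decomp cs.reverse (by simpa using h), ← he]
    simp

theorem endswith_false_of_no_dot (name suf : String) (hs : '.' ∈ suf.toList)
    (h : '.' ∉ name.toList) : PySem.Str.endswith name suf = false := by
  rw [Bool.eq_false_iff]
  intro he
  simp only [PySem.Str.endswith_eq] at he
  exact h (((PySem.Chars.endswith_iff _ _).mp he).subset hs)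

theorem scan_no_dot (name ct : String) (h : '.' ∉ name.toList) :
    ectScan name ct pySuffixMap = ct := by
  simp only [pySuffixMap, ectScan]
  rw [endswith_false_of_no_dot name ".jpg" (by decide) h,
      endswith_false_of_no_dot name ".jpeg" (by decide) h,
      endswith_false_of_no_dot name ".jpe" (by decide) h,
      endswith_false_of_no_dot name ".jfif" (by decide) h,
      endswith_false_of_no_dot name ".png" (by decide) h,
      endswith_false_of_no_dot name ".webp" (by decide) h,
      endswith_false_of_no_dot name ".gif" (by decide) h,
      endswith_false_of_no_dot name ".mp4" (by decide) h,
      endswith_false_of_no_dot name ".webm" (by decide) h,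
      endswith_false_of_no_dot name ".mov" (by decide) h]
  simp

-- Str.endswith on a '.'+tail key, as a decidable equality on the reversed extension
theorem endswith_eq_decide (name : String) (tail : List Char) (ht : '.' ∉ tail)
    (h : '.' ∈ name.toList) :
    PySem.Str.endswith name (String.ofList ('.' :: tail))
      = decide (tail.reverse = name.toList.reverse.takeWhile (· != '.')) := by
  by_cases hd : tail.reverse = name.toList.reverse.takeWhile (· != '.')
  · rw [decide_eq_true hd]
    simp only [PySem.Str.endswith_eq]
    rw [PySem.Chars.endswith_iff]
    have := (key_iff name.toList tail ht h).mpr hd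
    simpa using this
  · rw [decide_eq_false hd, Bool.eq_false_iff]
    intro he
    apply hd
    apply (key_iff name.toList tail ht h).mp
    simp only [PySem.Str.endswith_eq] at he
    rw [PySem.Chars.endswith_iff] at he
    simpa using he

theorem key_ne (tail e : List Char) (h : ¬ tail.reverse = e) :
    ((String.ofList ('.' :: tail)) == String.ofList ('.' :: e.reverse)) = false := by
  rw [beq_eq_false_iff_ne]
  intro hx
  apply h
  have h2 := congrArg String.toList hx
  simp at h2
  simp [h2]

-- the heart of the equivalence: ordered endswith-scan = extension-dict lookup
theorem scan_eq_lookup (name ct : String) :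
    ectScan name ct pySuffixMap =
      (if name.toList.contains '.' then
        PySem.Dict.getD extMime
          (String.ofList ('.' :: (name.toList.reverse.takeWhile (· != '.')).reverse)) ct
      else ct) := by
  by_cases h : '.' ∈ name.toList
  · rw [if_pos (by simpa using h)]
    set e := name.toList.reverse.takeWhile (· != '.') with hedef
    have hjpg : PySem.Str.endswith name ".jpg" = decide ((['j','p','g'] : List Char).reverse = e) := by
      rw [show (".jpg" : String) = String.ofList ('.' :: ['j','p','g']) from by decide, hedef]
      exact endswith_eq_decide name ['j','p','g'] (by decide) h
    have hjpeg : PySem.Str.endswith name ".jpeg" = decide ((['j','p','e','g'] : List Char).reverse = e) := by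
      rw [show (".jpeg" : String) = String.ofList ('.' :: ['j','p','e','g']) from by decide, hedef]
      exact endswith_eq_decide name ['j','p','e','g'] (by decide) h
    have hjpe : PySem.Str.endswith name ".jpe" = decide ((['j','p','e'] : List Char).reverse = e) := by
      rw [show (".jpe" : String) = String.ofList ('.' :: ['j','p','e']) from by decide, hedef]
      exact endswith_eq_decide name ['j','p','e'] (by decide) h
    have hjfif : PySem.Str.endswith name ".jfif" = decide ((['j','f','i','f'] : List Char).reverse = e) := by
      rw [show (".jfif" : String) = String.ofList ('.' :: ['j','f','i','f']) from by decide, hedef]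
      exact endswith_eq_decide name ['j','f','i','f'] (by decide) h
    have hpng : PySem.Str.endswith name ".png" = decide ((['p','n','g'] : List Char).reverse = e) := by
      rw [show (".png" : String) = String.ofList ('.' :: ['p','n','g']) from by decide, hedef]
      exact endswith_eq_decide name ['p','n','g'] (by decide) h
    have hwebp : PySem.Str.endswith name ".webp" = decide ((['w','e','b','p'] : List Char).reverse = e) := by
      rw [show (".webp" : String) = String.ofList ('.' :: ['w','e','b','p']) from by decide, hedef]
      exact endswith_eq_decide name ['w','e','b','p'] (by decide) h
    have hgif : PySem.Str.endswith name ".gif" = decide ((['g','i','f'] : List Char).reverse = e) := by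
      rw [show (".gif" : String) = String.ofList ('.' :: ['g','i','f']) from by decide, hedef]
      exact endswith_eq_decide name ['g','i','f'] (by decide) h
    have hmp4 : PySem.Str.endswith name ".mp4" = decide ((['m','p','4'] : List Char).reverse = e) := by
      rw [show (".mp4" : String) = String.ofList ('.' :: ['m','p','4']) from by decide, hedef]
      exact endswith_eq_decide name ['m','p','4'] (by decide) h
    have hwebm : PySem.Str.endswith name ".webm" = decide ((['w','e','b','m'] : List Char).reverse = e) := by
      rw [show (".webm" : String) = String.ofList ('.' :: ['w','e','b','m']) from by decide, hedef]
      exact endswith_eq_decide name ['w','e','b','m'] (by decide) h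
    have hmov : PySem.Str.endswith name ".mov" = decide ((['m','o','v'] : List Char).reverse = e) := by
      rw [show (".mov" : String) = String.ofList ('.' :: ['m','o','v']) from by decide, hedef]
      exact endswith_eq_decide name ['m','o','v'] (by decide) h
    simp only [pySuffixMap, ectScan]
    rw [hjpg, hjpeg, hjpe, hjfif, hpng, hwebp, hgif, hmp4, hwebm, hmov]
    by_cases h1 : (['j','p','g'] : List Char).reverse = e
    · rw [← h1, if_pos (by decide), PySem.Dict.getD_eq_get?_getD,
          show extMime.get? (String.ofList ('.' :: (['j','p','g'] : List Char).reverse.reverse)) = some "image/jpeg" from by decide]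
      rfl
    rw [if_neg (by simpa using h1)]
    by_cases h2 : (['j','p','e','g'] : List Char).reverse = e
    · rw [← h2, if_pos (by decide), PySem.Dict.getD_eq_get?_getD,
          show extMime.get? (String.ofList ('.' :: (['j','p','e','g'] : List Char).reverse.reverse)) = some "image/jpeg" from by decide]
      rfl
    rw [if_neg (by simpa using h2)]
    by_cases h3 : (['j','p','e'] : List Char).reverse = e
    · rw [← h3, if_pos (by decide), PySem.Dict.getD_eq_get?_getD,
          show extMime.get? (String.ofList ('.' :: (['j','p','e'] : List Char).reverse.reverse)) = some "image/jpeg" from by decide]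
      rfl
    rw [if_neg (by simpa using h3)]
    by_cases h4 : (['j','f','i','f'] : List Char).reverse = e
    · rw [← h4, if_pos (by decide), PySem.Dict.getD_eq_get?_getD,
          show extMime.get? (String.ofList ('.' :: (['j','f','i','f'] : List Char).reverse.reverse)) = some "image/jpeg" from by decide]
      rfl
    rw [if_neg (by simpa using h4)]
    by_cases h5 : (['p','n','g'] : List Char).reverse = e
    · rw [← h5, if_pos (by decide), PySem.Dict.getD_eq_get?_getD,
          show extMime.get? (String.ofList ('.' :: (['p','n','g'] : List Char).reverse.reverse)) = some "image/png" from by decide]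
      rfl
    rw [if_neg (by simpa using h5)]
    by_cases h6 : (['w','e','b','p'] : List Char).reverse = e
    · rw [← h6, if_pos (by decide), PySem.Dict.getD_eq_get?_getD,
          show extMime.get? (String.ofList ('.' :: (['w','e','b','p'] : List Char).reverse.reverse)) = some "image/webp" from by decide]
      rfl
    rw [if_neg (by simpa using h6)]
    by_cases h7 : (['g','i','f'] : List Char).reverse = e
    · rw [← h7, if_pos (by decide), PySem.Dict.getD_eq_get?_getD,
          show extMime.get? (String.ofList ('.' :: (['g','i','f'] : List Char).reverse.reverse)) = some "image/gif" from by decide]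
      rfl
    rw [if_neg (by simpa using h7)]
    by_cases h8 : (['m','p','4'] : List Char).reverse = e
    · rw [← h8, if_pos (by decide), PySem.Dict.getD_eq_get?_getD,
          show extMime.get? (String.ofList ('.' :: (['m','p','4'] : List Char).reverse.reverse)) = some "video/mp4" from by decide]
      rfl
    rw [if_neg (by simpa using h8)]
    by_cases h9 : (['w','e','b','m'] : List Char).reverse = e
    · rw [← h9, if_pos (by decide), PySem.Dict.getD_eq_get?_getD,
          show extMime.get? (String.ofList ('.' :: (['w','e','b','m'] : List Char).reverse.reverse)) = some "video/webm" from by decide]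
      rfl
    rw [if_neg (by simpa using h9)]
    by_cases h10 : (['m','o','v'] : List Char).reverse = e
    · rw [← h10, if_pos (by decide), PySem.Dict.getD_eq_get?_getD,
          show extMime.get? (String.ofList ('.' :: (['m','o','v'] : List Char).reverse.reverse)) = some "video/quicktime" from by decide]
      rfl
    rw [if_neg (by simpa using h10)]
    -- no key matches: the lookup misses too
    have hmk : extMime = PySem.Dict.mk
      [(".jpg", "image/jpeg"), (".jpeg", "image/jpeg"), (".jpe", "image/jpeg"),
       (".jfif", "image/jpeg"), (".png", "image/png"), (".webp", "image/webp"),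
       (".gif", "image/gif"), (".mp4", "video/mp4"), (".webm", "video/webm"),
       (".mov", "video/quicktime")] := by decide
    rw [hmk, PySem.Dict.getD_eq_get?_getD,
        show (".jpg" : String) = String.ofList ('.' :: ['j','p','g']) from by decide,
        show (".jpeg" : String) = String.ofList ('.' :: ['j','p','e','g']) from by decide,
        show (".jpe" : String) = String.ofList ('.' :: ['j','p','e']) from by decide,
        show (".jfif" : String) = String.ofList ('.' :: ['j','f','i','f']) from by decide,
        show (".png" : String) = String.ofList ('.' :: ['p','n','g']) from by decide,
        show (".webp" : String) = String.ofList ('.' :: ['w','e','b','p']) from by decide,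
        show (".gif" : String) = String.ofList ('.' :: ['g','i','f']) from by decide,
        show (".mp4" : String) = String.ofList ('.' :: ['m','p','4']) from by decide,
        show (".webm" : String) = String.ofList ('.' :: ['w','e','b','m']) from by decide,
        show (".mov" : String) = String.ofList ('.' :: ['m','o','v']) from by decide]
    simp only [PySem.Dict.get?_mk_cons,
      key_ne _ _ h1, key_ne _ _ h2, key_ne _ _ h3, key_ne _ _ h4, key_ne _ _ h5,
      key_ne _ _ h6, key_ne _ _ h7, key_ne _ _ h8, key_ne _ _ h9, key_ne _ _ h10]
    simp [PySem.Dict.get?]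
  · rw [if_neg (by simpa using h), scan_no_dot name ct h]

-- ===== VERDICT (by name: the statement is the Claim_ definition above) =====
theorem effective_content_type_py_spec : Claim_equal_effective_content_type_py := by
  intro filename content_type _
  unfold Spec_effective_content_type_py
  simp only [effective_content_type_py, effective_content_type_py_alt]
  set ct := PySem.Str.strip (content_type.getD "") with hct
  set low := PySem.Str.lower ct with hlow
  by_cases hl : low = "" ∨ low = "application/octet-stream"
  · have hg : (!(low == "" || low == "application/octet-stream")) = false := by
      rcases hl with h | h <;> simp [h]
    rw [hg]
    rcases hl with h | h <;> rw [h]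
    · rw [show (PySem.Str.startswith "" "image/" || PySem.Str.startswith "" "video/") = false from by decide,
          show PySem.Set.contains
            (PySem.Set.union (PySem.Set.ofList ["image/jpeg", "image/png", "image/webp"])
              (PySem.Set.ofList ["video/mp4", "video/webm"])) "" = false from by decide]
      simp only [Bool.false_eq_true, if_false]
      exact scan_eq_lookup _ ct
    · rw [show (PySem.Str.startswith "application/octet-stream" "image/" ||
            PySem.Str.startswith "application/octet-stream" "video/") = false from by decide,
          show PySem.Set.contains
            (PySem.Set.union (PySem.Set.ofList ["image/jpeg", "image/png", "image/webp"])
              (PySem.Set.ofList ["video/mp4", "video/webm"])) "application/octet-stream" = false from by decide]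
      simp only [Bool.false_eq_true, if_false]
      exact scan_eq_lookup _ ct
  · push Not at hl
    have hg : (!(low == "" || low == "application/octet-stream")) = true := by
      simp [hl.1, hl.2]
    rw [hg]
    simp only [if_true]
    split_ifs <;> rfl
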